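-- pv_equiv track=rewrite | github.com/hikaru-212/etl_learning_journey | coding_training/basic/moduleE_comprehensions/drills/lowlevel.py | run_P2_unique_word_lengths
-- ===== SOURCE A (Python) =====
-- def run_P2_unique_word_lengths(sentence: str) -> set[int]:
--     lengths = set()
--     current = ""
--     #上半段是邊走邊拼字、遇空白就記錄長度
--     for ch in sentence:
--         if ch == " ":
--             if current != "":
--                 lengths.add(len(current))
--                 current = ""
--         else:
--             current += ch
--     #下半段是句尾補上最後那個還沒遇空白的字
--     if current != "":
--         lengths.add(len(current))
--     return lengths
-- ===== SOURCE B (Python) =====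
-- def run_P2_unique_word_lengths(sentence: str) -> set[int]:
--     return {len(w) for w in sentence.split(" ") if w}
-- ===== Notes on version B (the rewrite author's own statement) =====
-- stated objective: idiomatic
-- what changed: Replaces the char-by-char scan with a mutable `current` buffer by library tokenization: split on a literal space, drop empty tokens, and collect the lengths with a set comprehension.
import Mathlib
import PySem

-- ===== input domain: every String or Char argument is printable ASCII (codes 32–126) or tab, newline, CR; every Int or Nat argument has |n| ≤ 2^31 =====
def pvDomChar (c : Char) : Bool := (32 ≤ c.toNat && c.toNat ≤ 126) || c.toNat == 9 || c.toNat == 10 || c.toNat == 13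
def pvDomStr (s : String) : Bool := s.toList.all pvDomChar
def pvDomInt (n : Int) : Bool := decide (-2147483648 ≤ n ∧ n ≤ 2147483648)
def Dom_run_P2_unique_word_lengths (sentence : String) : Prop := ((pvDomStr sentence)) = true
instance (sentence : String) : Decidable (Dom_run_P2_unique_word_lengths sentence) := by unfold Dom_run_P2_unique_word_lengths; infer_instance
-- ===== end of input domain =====

-- B replaces the char-by-char accumulator loop with split-on-space + filter + set comprehension (same return value; alternative decomposition).
-- ===== PORT A =====
def pvStepA (st : PySem.Set Int × List Char) (ch : Char) : PySem.Set Int × List Char :=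
  if ch = ' ' then
    (if st.2 ≠ [] then (PySem.Set.add st.1 (st.2.length : Int), ([] : List Char)) else st)
  else
    (st.1, st.2 ++ [ch])

def run_P2_unique_word_lengths (sentence : String) : List Int :=
  let st := sentence.toList.foldl pvStepA (PySem.Set.empty, [])
  if st.2 ≠ [] then PySem.Set.add st.1 (st.2.length : Int) else st.1

-- ===== PORT B =====
def run_P2_unique_word_lengths_alt (sentence : String) : List Int :=
  PySem.Set.ofList
    (((PySem.Chars.splitOn sentence.toList [' ']).filter (fun w => w ≠ ([] : List Char))).map
      (fun w => (w.length : Int)))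

-- ===== PRECONDITION & SPEC =====
def Spec_run_P2_unique_word_lengths (sentence : String) (out : List Int) : Prop := out = run_P2_unique_word_lengths_alt sentence
instance (sentence : String) (out : List Int) : Decidable (Spec_run_P2_unique_word_lengths sentence out) := by unfold Spec_run_P2_unique_word_lengths; infer_instance

-- ===== CLAIM (what is proved, stated in full; the proofs are below) =====
def Claim_equal_run_P2_unique_word_lengths : Prop := ∀ (sentence : String), Dom_run_P2_unique_word_lengths sentence → Spec_run_P2_unique_word_lengths sentence (run_P2_unique_word_lengths sentence)

-- ===== LEMMAS AND PROOFS =====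

-- `toks cs` = cs split on single spaces, keeping empty pieces (right-recursive form of splitOn)
def toks : List Char → List (List Char)
  | [] => [[]]
  | c :: cs => if c = ' ' then [] :: toks cs
               else match toks cs with
                    | t :: ts => (c :: t) :: ts
                    | [] => [[c]]

lemma toks_ne_nil (cs : List Char) : toks cs ≠ [] := by
  cases cs with
  | nil => simp [toks]
  | cons c cs =>
    simp only [toks]
    split
    · simp
    · split <;> simp_all

lemma toks_eq_cons (cs : List Char) : toks cs = (toks cs).headI :: (toks cs).tail :=
  (List.cons_head!_tail (toks_ne_nil cs)).symm ▸ by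
    cases h : toks cs with
    | nil => exact absurd h (toks_ne_nil cs)
    | cons a l => simp

lemma go_eq (l : List Char) : ∀ (fuel : Nat) (cur : List Char) (acc : List (List Char)),
    l.length < fuel →
    PySem.Chars.splitOn.go [' '] fuel l cur acc
      = acc.reverse ++ (cur.reverse ++ (toks l).headI) :: (toks l).tail := by
  induction l with
  | nil =>
    intro fuel cur acc _
    cases fuel <;> simp [PySem.Chars.splitOn.go, toks]
  | cons c cs ih =>
    intro fuel cur acc h
    cases fuel with
    | zero => omega
    | succ f =>
      by_cases hc : c = ' '
      · subst hc
        have : PySem.Chars.splitOn.go [' '] (f+1) (' ' :: cs) cur acc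
            = PySem.Chars.splitOn.go [' '] f cs [] (cur.reverse :: acc) := by
          simp [PySem.Chars.splitOn.go]
        rw [this, ih f [] (cur.reverse :: acc) (by simpa using Nat.lt_of_succ_lt_succ h)]
        simp [toks, ← toks_eq_cons cs]
      · have hpc : ([' '] : List Char).isPrefixOf (c :: cs) = false := by
          simp [List.isPrefixOf, Ne.symm hc]
        have : PySem.Chars.splitOn.go [' '] (f+1) (c :: cs) cur acc
            = PySem.Chars.splitOn.go [' '] f cs (c :: cur) acc := by
          simp [PySem.Chars.splitOn.go, hpc]
        rw [this, ih f (c :: cur) acc (by simpa using Nat.lt_of_succ_lt_succ h)]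
        have := toks_eq_cons cs
        simp only [toks, if_neg hc]
        rw [this]
        simp

lemma splitOn_eq_toks (s : List Char) : PySem.Chars.splitOn s [' '] = toks s := by
  show PySem.Chars.splitOn.go [' '] (s.length + 1) s [] [] = toks s
  rw [go_eq s (s.length + 1) [] [] (by omega)]
  simpa using (toks_eq_cons s).symm

-- the nonempty words of cur ++ cs, cur being the pending (unterminated) prefix
def wds (cur : List Char) : List Char → List (List Char)
  | [] => if cur = [] then [] else [cur]
  | c :: cs => if c = ' ' then (if cur = [] then wds [] cs else cur :: wds [] cs)
               else wds (cur ++ [c]) cs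

lemma filter_toks (cs : List Char) : ∀ cur : List Char,
    (((cur ++ (toks cs).headI) :: (toks cs).tail).filter (fun w => w ≠ ([] : List Char)))
      = wds cur cs := by
  induction cs with
  | nil =>
    intro cur
    simp only [toks, wds, List.headI, List.tail]
    by_cases h : cur = [] <;> simp [h, List.filter]
  | cons c cs ih =>
    intro cur
    by_cases hc : c = ' '
    · subst hc
      simp only [toks, List.headI, List.tail, wds]
      have hfil : (toks cs).filter (fun w => w ≠ ([] : List Char)) = wds [] cs := by
        have := ih []
        rwa [List.nil_append, ← toks_eq_cons cs] at this
      simp only [ne_eq, decide_not] at hfil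
      by_cases h : cur = [] <;> simp [h, hfil]
    · simp only [toks, if_neg hc]
      rw [toks_eq_cons cs]
      rw [show wds cur (c :: cs) = wds (cur ++ [c]) cs from by simp [wds, hc]]
      have := ih (cur ++ [c])
      rw [toks_eq_cons cs] at this
      simp only [List.headI_cons, List.tail_cons, List.append_assoc,
        List.singleton_append] at this ⊢
      exact this

lemma loopA (cs : List Char) : ∀ (cur : List Char) (s : PySem.Set Int),
    (if (List.foldl pvStepA (s, cur) cs).2 ≠ []
       then PySem.Set.add (List.foldl pvStepA (s, cur) cs).1
              (((List.foldl pvStepA (s, cur) cs).2.length : Int))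
       else (List.foldl pvStepA (s, cur) cs).1)
      = (wds cur cs).foldl (fun s w => PySem.Set.add s (w.length : Int)) s := by
  induction cs with
  | nil =>
    intro cur s
    by_cases h : cur = [] <;> simp [wds, h]
  | cons c cs ih =>
    intro cur s
    by_cases hc : c = ' '
    · subst hc
      by_cases h : cur = []
      · subst h
        have hstep : pvStepA (s, ([] : List Char)) ' ' = (s, []) := by simp [pvStepA]
        simp only [List.foldl_cons, hstep]
        simpa [wds] using ih [] s
      · have hstep : pvStepA (s, cur) ' ' = (PySem.Set.add s (cur.length : Int), []) := by
          simp [pvStepA, h]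
        simp only [List.foldl_cons, hstep]
        rw [ih [] (PySem.Set.add s (cur.length : Int))]
        simp [wds, h]
    · have hstep : pvStepA (s, cur) c = (s, cur ++ [c]) := by simp [pvStepA, hc]
      simp only [List.foldl_cons, hstep]
      rw [ih (cur ++ [c]) s]
      simp [wds, hc]


-- ===== VERDICT (by name: the statement is the Claim_ definition above) =====
theorem run_P2_unique_word_lengths_spec : Claim_equal_run_P2_unique_word_lengths := by
  intro sentence _
  unfold Spec_run_P2_unique_word_lengths
  unfold run_P2_unique_word_lengths run_P2_unique_word_lengths_alt
  rw [splitOn_eq_toks]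
  have hfil := filter_toks sentence.toList []
  rw [List.nil_append] at hfil
  rw [toks_eq_cons sentence.toList, hfil, PySem.Set.ofList_eq_foldl, List.foldl_map]
  exact loopA sentence.toList [] PySem.Set.empty
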